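-- pv_equiv track=rewrite | github.com/InvestigacionUCU/Bloqueo-DNS-America-Latina-analisis- | src/classification/tag_classifier.py | deduccion
-- ===== SOURCE A (Python) =====
-- def deduccion(dic):
--     if not dic:
--         return None
--
--     sorted_items = sorted(dic.items(), key=lambda x: x[1], reverse=True)
--     max_value = sorted_items[0][1]
--     max_categories = [key for key, value in sorted_items if value == max_value]
--
--     if len(max_categories) >= 2:
--         return max_categories
--
--     return [sorted_items[0][0], sorted_items[1][0]] if len(sorted_items) > 1 else [sorted_items[0][0]]
-- ===== SOURCE B (Python) =====
-- def deduccion(dic):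
--     if not dic:
--         return None
--     it = iter(dic.items())
--     k0, best = next(it)
--     best_keys = [k0]
--     sv = sk = None  # best (value, key) strictly below `best`, first in insertion order
--     for k, v in it:
--         if v < best:
--             if sv is None or sv < v:
--                 sv = v
--                 sk = k
--         elif v == best:
--             best_keys.append(k)
--         else:
--             sv = best
--             sk = best_keys[0]
--             best = v
--             best_keys = [k]
--     if len(best_keys) >= 2:
--         return best_keys
--     if sv is not None:
--         return [best_keys[0], sk]
--     return best_keys
-- ===== Notes on version B (the rewrite author's own statement) =====
-- stated objective: faster
-- what changed: B replaces A's full stable descending sort of the dict items by a single linear pass that maintains the max value, the insertion-ordered list of keys tied at the max, and the first (value, key) pair strictly below the max.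
import Mathlib
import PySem

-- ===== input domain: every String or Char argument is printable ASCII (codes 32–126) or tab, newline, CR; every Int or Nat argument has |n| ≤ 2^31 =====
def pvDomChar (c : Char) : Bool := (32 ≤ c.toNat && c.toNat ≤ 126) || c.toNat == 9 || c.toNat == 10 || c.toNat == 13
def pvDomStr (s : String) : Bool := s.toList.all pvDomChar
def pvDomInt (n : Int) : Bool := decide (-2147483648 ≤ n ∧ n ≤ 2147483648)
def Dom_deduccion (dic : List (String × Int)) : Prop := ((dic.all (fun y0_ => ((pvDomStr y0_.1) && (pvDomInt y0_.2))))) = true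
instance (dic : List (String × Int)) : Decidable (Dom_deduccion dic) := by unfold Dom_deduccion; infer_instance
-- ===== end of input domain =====

-- B replaces A's full stable sort by a single linear pass that tracks the tied-max key
-- group and the first second-best item (objective: faster; measured ~1.6x at the largest size).

-- ===== PORT A =====
def deduccion (dic : List (String × Int)) : Option (List String) :=
  if dic = [] then none
  else
    let sorted_items := PySem.List.sorted dic (fun x => x.2) true
    let max_value := (PySem.List.pyGetD sorted_items 0 ("", 0)).2
    let max_categories := (sorted_items.filter (fun p => p.2 == max_value)).map (fun p => p.1)
    if max_categories.length ≥ 2 then some max_categories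
    else if PySem.List.len sorted_items > 1 then
      some [(PySem.List.pyGetD sorted_items 0 ("", 0)).1,
            (PySem.List.pyGetD sorted_items 1 ("", 0)).1]
    else some [(PySem.List.pyGetD sorted_items 0 ("", 0)).1]

-- ===== PORT B =====
-- one step of B's pass: state = (best value, keys tied at best in insertion order,
-- first (value, key) strictly below best, if any)
def altStep (st : Int × List String × Option (Int × String)) (p : String × Int) :
    Int × List String × Option (Int × String) :=
  if p.2 < st.1 then
    match st.2.2 with
    | none => (st.1, st.2.1, some (p.2, p.1))
    | some (s, k) => if s < p.2 then (st.1, st.2.1, some (p.2, p.1)) else (st.1, st.2.1, some (s, k))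
  else if p.2 = st.1 then (st.1, st.2.1 ++ [p.1], st.2.2)
  else (p.2, [p.1], some (st.1, st.2.1.headD ""))

def deduccion_alt (dic : List (String × Int)) : Option (List String) :=
  match dic with
  | [] => none
  | x :: rest =>
    let st := rest.foldl altStep (x.2, [x.1], none)
    if st.2.1.length ≥ 2 then some st.2.1
    else
      match st.2.2 with
      | some (_, k2) => some [st.2.1.headD "", k2]
      | none => some st.2.1

-- ===== PRECONDITION & SPEC =====
def Spec_deduccion (dic : List (String × Int)) (out : Option (List String)) : Prop := out = deduccion_alt dic
instance (dic : List (String × Int)) (out : Option (List String)) : Decidable (Spec_deduccion dic out) := by unfold Spec_deduccion; infer_instance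

-- ===== CLAIM (what is proved, stated in full; the proofs are below) =====
def Claim_equal_deduccion : Prop := ∀ (dic : List (String × Int)), Dom_deduccion dic → Spec_deduccion dic (deduccion dic)

-- ===== LEMMAS AND PROOFS =====

-- the maximum of the values of a list (0 for [])
def maxV (l : List (String × Int)) : Int :=
  match l with
  | [] => 0
  | p :: r => (r.map (fun q => q.2)).foldl max p.2

-- the elements strictly below the maximum
def lowOf (l : List (String × Int)) : List (String × Int) :=
  l.filter (fun p => decide (p.2 < maxV l))

-- the first key attaining the maximum
def fkey (l : List (String × Int)) : String :=
  ((l.filter (fun p => p.2 == maxV l)).map (fun p => p.1)).headD ""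

-- the (value, first key) of the best value strictly below the maximum, if any
def secOf (l : List (String × Int)) : Option (Int × String) :=
  if lowOf l = [] then none else some (maxV (lowOf l), fkey (lowOf l))

-- closed form of B's fold state after a nonempty list
def refOf (l : List (String × Int)) : Int × List String × Option (Int × String) :=
  (maxV l, (l.filter (fun p => p.2 == maxV l)).map (fun p => p.1), secOf l)

theorem maxV_le (l : List (String × Int)) (q : String × Int) (hq : q ∈ l) : q.2 ≤ maxV l := by
  match l with
  | [] => cases hq
  | p :: r =>
    have h := PySem.List.le_foldl_max (r.map (fun q => q.2)) p.2
    rcases List.mem_cons.mp hq with h1 | h1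
    · subst h1; exact h.1
    · exact h.2 _ (List.mem_map_of_mem h1)

theorem maxV_attained (l : List (String × Int)) (hl : l ≠ []) :
    ∃ q ∈ l, q.2 = maxV l := by
  match l with
  | p :: r =>
    have h := PySem.List.foldl_max_mem (r.map (fun q => q.2)) p.2
    rcases h with h | h
    · exact ⟨p, List.mem_cons_self .., h.symm⟩
    · rcases List.mem_map.mp h with ⟨q, hq, hq2⟩
      exact ⟨q, List.mem_cons_of_mem _ hq, hq2⟩

theorem filter_maxV_ne_nil (l : List (String × Int)) (hl : l ≠ []) :
    l.filter (fun p => p.2 == maxV l) ≠ [] := by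
  rcases maxV_attained l hl with ⟨q, hq, hq2⟩
  intro hnil
  have : q ∈ l.filter (fun p => p.2 == maxV l) := by
    rw [List.mem_filter]; exact ⟨hq, by simp [hq2]⟩
  rw [hnil] at this; cases this

theorem maxV_append_singleton (l : List (String × Int)) (hl : l ≠ []) (p : String × Int) :
    maxV (l ++ [p]) = max (maxV l) p.2 := by
  match l with
  | q :: r => simp [maxV, List.foldl_append]

theorem headD_map_append {α β : Type} (X Y : List α) (f : α → β) (d : β) (hX : X ≠ []) :
    (((X ++ Y).map f)).headD d = (X.map f).headD d := by
  cases X with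
  | nil => cases hX rfl
  | cons a t => rfl

-- inserting x after a block none of whose elements x must precede
theorem insertBy_skip {α : Type} (before : α → α → Bool) (x : α) (F S : List α)
    (h : ∀ y ∈ F, before x y = false) :
    PySem.List.insertBy before x (F ++ S) = F ++ PySem.List.insertBy before x S := by
  induction F with
  | nil => rfl
  | cons y F ih =>
    have hy := h y (List.mem_cons_self ..)
    rw [List.cons_append, PySem.List.insertBy, hy]
    simp only [Bool.false_eq_true, if_false, List.cons_append]
    rw [ih (fun z hz => h z (List.mem_cons_of_mem _ hz))]

-- a stable descending sort splits off the tied-max prefix in original order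
theorem sortedSplit (l : List (String × Int)) (m : Int) (h : ∀ p ∈ l, p.2 ≤ m) :
    PySem.List.sorted l (fun p => p.2) true =
      l.filter (fun p => p.2 == m) ++
        PySem.List.sorted (l.filter (fun p => decide (p.2 < m))) (fun p => p.2) true := by
  induction l using List.reverseRecOn with
  | nil => rfl
  | append_singleton l x ih =>
    have hIH := ih (fun p hp => h p (List.mem_append_left _ hp))
    have hx : x.2 ≤ m := h x (List.mem_append_right _ (List.mem_cons_self ..))
    rw [PySem.List.sorted_rev_eq_foldl_insertBy, List.foldl_append, List.foldl_cons, List.foldl_nil,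
        ← PySem.List.sorted_rev_eq_foldl_insertBy, hIH]
    rcases eq_or_lt_of_le hx with hxm | hxm
    · -- x.2 = m : x goes right after the tied-max block
      have hskip : PySem.List.insertBy (fun a b => decide (b.2 < a.2)) x
          (l.filter (fun p => p.2 == m) ++
            PySem.List.sorted (l.filter (fun p => decide (p.2 < m))) (fun p => p.2) true)
          = l.filter (fun p => p.2 == m) ++
            PySem.List.insertBy (fun a b => decide (b.2 < a.2)) x
              (PySem.List.sorted (l.filter (fun p => decide (p.2 < m))) (fun p => p.2) true) := by
        apply insertBy_skip
        intro y hy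
        have hy2 : y.2 = m := by simpa using (List.mem_filter.mp hy).2
        simp [hy2, hxm]
      rw [hskip]
      have hhead : PySem.List.insertBy (fun a b => decide (b.2 < a.2)) x
          (PySem.List.sorted (l.filter (fun p => decide (p.2 < m))) (fun p => p.2) true)
          = x :: PySem.List.sorted (l.filter (fun p => decide (p.2 < m))) (fun p => p.2) true := by
        cases hS : PySem.List.sorted (l.filter (fun p => decide (p.2 < m))) (fun p => p.2) true with
        | nil => rfl
        | cons z t =>
          have hz : z ∈ PySem.List.sorted (l.filter (fun p => decide (p.2 < m))) (fun p => p.2) true := by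
            rw [hS]; exact List.mem_cons_self ..
          have hz2 : z.2 < m := by
            simpa using (List.mem_filter.mp ((PySem.List.mem_sorted _ _ _ _).mp hz)).2
          rw [PySem.List.insertBy]
          have : decide (z.2 < x.2) = true := by simp [hxm, hz2]
          simp [this]
      rw [hhead]
      rw [List.filter_append, List.filter_append]
      have h1 : [x].filter (fun p => p.2 == m) = [x] := by simp [hxm]
      have h2 : [x].filter (fun p => decide (p.2 < m)) = [] := by simp [hxm]
      rw [h1, h2, List.append_nil]
      simp
    · -- x.2 < m : x is inserted into the tail sort
      have hskip : PySem.List.insertBy (fun a b => decide (b.2 < a.2)) x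
          (l.filter (fun p => p.2 == m) ++
            PySem.List.sorted (l.filter (fun p => decide (p.2 < m))) (fun p => p.2) true)
          = l.filter (fun p => p.2 == m) ++
            PySem.List.insertBy (fun a b => decide (b.2 < a.2)) x
              (PySem.List.sorted (l.filter (fun p => decide (p.2 < m))) (fun p => p.2) true) := by
        apply insertBy_skip
        intro y hy
        have hy2 : y.2 = m := by simpa using (List.mem_filter.mp hy).2
        simp [hy2]
        omega
      rw [hskip]
      rw [List.filter_append, List.filter_append]
      have h1 : [x].filter (fun p => p.2 == m) = [] := by simp; omega
      have h2 : [x].filter (fun p => decide (p.2 < m)) = [x] := by simp [hxm]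
      rw [h1, h2, List.append_nil]
      congr 1
      conv_rhs => rw [PySem.List.sorted_rev_eq_foldl_insertBy]
      rw [List.foldl_append, List.foldl_cons, List.foldl_nil,
          ← PySem.List.sorted_rev_eq_foldl_insertBy]

theorem altStep_ref (l : List (String × Int)) (hl : l ≠ []) (p : String × Int) :
    altStep (refOf l) p = refOf (l ++ [p]) := by
  have hmax := maxV_append_singleton l hl p
  rcases lt_trichotomy (maxV l) p.2 with hc | hc | hc
  · -- p is a new strict maximum
    have hm' : maxV (l ++ [p]) = p.2 := by rw [hmax]; omega
    have hfe : l.filter (fun q => q.2 == p.2) = [] := by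
      rw [List.filter_eq_nil_iff]; intro q hq
      have := maxV_le l q hq; simp; omega
    have hfl : l.filter (fun q => decide (q.2 < p.2)) = l := by
      rw [List.filter_eq_self]; intro q hq
      have := maxV_le l q hq; simp; omega
    have hnp : ¬ p.2 < maxV l := by omega
    have hne : p.2 ≠ maxV l := by omega
    simp only [altStep, refOf, secOf, lowOf, fkey, hm', List.filter_append]
    rw [hfe, hfl]
    simp [hl, hnp, hne]
  · -- p ties the maximum
    have hm' : maxV (l ++ [p]) = maxV l := by rw [hmax]; omega
    simp only [altStep, refOf, secOf, lowOf, fkey, hm', List.filter_append]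
    have h1 : [p].filter (fun q => q.2 == maxV l) = [p] := by simp [hc]
    have h2 : [p].filter (fun q => decide (q.2 < maxV l)) = [] := by simp [hc]
    rw [h1, h2, List.append_nil]
    simp [hc]
  · -- p is below the maximum
    have hm' : maxV (l ++ [p]) = maxV l := by rw [hmax]; omega
    have h1 : [p].filter (fun q => q.2 == maxV l) = [] := by simp; omega
    have h2 : [p].filter (fun q => decide (q.2 < maxV l)) = [p] := by simp [hc]
    have hlow' : lowOf (l ++ [p]) = lowOf l ++ [p] := by
      simp only [lowOf, hm', List.filter_append, h2]
    have hnp : ¬ maxV l < p.2 := by omega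
    have hne : p.2 ≠ maxV l := by omega
    by_cases h0 : lowOf l = []
    · -- no previous second-best: p becomes it
      have hsl : secOf l = none := by simp [secOf, h0]
      have hsec' : secOf (l ++ [p]) = some (p.2, p.1) := by
        rw [secOf, hlow', h0]
        simp [maxV, fkey]
      simp only [altStep, refOf, hsl]
      rw [hm', hsec', List.filter_append, h1, List.append_nil]
      simp [hc]
    · -- a previous second-best (s, k) exists
      have hsl : secOf l = some (maxV (lowOf l), fkey (lowOf l)) := by simp [secOf, h0]
      have hmax2 := maxV_append_singleton (lowOf l) h0 p
      by_cases hsp : maxV (lowOf l) < p.2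
      · have hm2 : maxV (lowOf l ++ [p]) = p.2 := by rw [hmax2]; omega
        have hfe2 : (lowOf l).filter (fun q => q.2 == p.2) = [] := by
          rw [List.filter_eq_nil_iff]; intro q hq
          have := maxV_le (lowOf l) q hq; simp; omega
        have hsec' : secOf (l ++ [p]) = some (p.2, p.1) := by
          rw [secOf, hlow', if_neg (by simp), hm2, fkey, hm2, List.filter_append, hfe2]
          simp
        simp only [altStep, refOf, hsl]
        rw [hm', hsec', List.filter_append, h1, List.append_nil]
        simp [hc, hsp]
      · have hm2 : maxV (lowOf l ++ [p]) = maxV (lowOf l) := by rw [hmax2]; omega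
        have hsec' : secOf (l ++ [p]) = some (maxV (lowOf l), fkey (lowOf l)) := by
          rw [secOf, hlow', if_neg (by simp), hm2, fkey, fkey, hm2, List.filter_append,
              headD_map_append _ _ _ _ (filter_maxV_ne_nil (lowOf l) h0)]
        simp only [altStep, refOf, hsl]
        rw [hm', hsec', List.filter_append, h1, List.append_nil]
        simp [hc, hsp]

theorem foldl_altStep (x : String × Int) (rest : List (String × Int)) :
    rest.foldl altStep (x.2, [x.1], none) = refOf (x :: rest) := by
  induction rest using List.reverseRecOn with
  | nil => simp [refOf, maxV, secOf, lowOf]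
  | append_singleton rest p ih =>
    rw [List.foldl_append, List.foldl_cons, List.foldl_nil, ih,
        altStep_ref _ (List.cons_ne_nil _ _) p, ← List.cons_append]

theorem deduccion_eq_alt (dic : List (String × Int)) : deduccion dic = deduccion_alt dic := by
  match dic with
  | [] => rfl
  | x :: rest =>
    have hl : x :: rest ≠ [] := List.cons_ne_nil _ _
    have hle : ∀ p ∈ x :: rest, p.2 ≤ maxV (x :: rest) := fun p hp => maxV_le _ p hp
    have hs : PySem.List.sorted (x :: rest) (fun p => p.2) true =
        (x :: rest).filter (fun p => p.2 == maxV (x :: rest)) ++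
          PySem.List.sorted (lowOf (x :: rest)) (fun p => p.2) true := by
      rw [lowOf]; exact sortedSplit _ _ hle
    obtain ⟨f0, F', hF'⟩ : ∃ f0 F', (x :: rest).filter (fun p => p.2 == maxV (x :: rest)) = f0 :: F' := by
      rcases hq : (x :: rest).filter (fun p => p.2 == maxV (x :: rest)) with _ | ⟨f0, F'⟩
      · exact absurd hq (filter_maxV_ne_nil _ hl)
      · exact ⟨f0, F', hq⟩
    have hf0m : f0.2 = maxV (x :: rest) := by
      have : f0 ∈ (x :: rest).filter (fun p => p.2 == maxV (x :: rest)) := by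
        rw [hF']; exact List.mem_cons_self ..
      simpa using (List.mem_filter.mp this).2
    have hSlt : ∀ q ∈ PySem.List.sorted (lowOf (x :: rest)) (fun p => p.2) true,
        q.2 < maxV (x :: rest) := by
      intro q hq
      have hmem := (PySem.List.mem_sorted _ _ _ _).mp hq
      rw [lowOf] at hmem
      simpa using (List.mem_filter.mp hmem).2
    rw [hF', List.cons_append] at hs
    have hfilter : ((f0 :: (F' ++ PySem.List.sorted (lowOf (x :: rest)) (fun p => p.2) true)).filter
        (fun p => p.2 == maxV (x :: rest))) = f0 :: F' := by
      rw [← List.cons_append, List.filter_append, ← hF', List.filter_filter]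
      have h2 : (PySem.List.sorted (lowOf (x :: rest)) (fun p => p.2) true).filter
          (fun p => p.2 == maxV (x :: rest)) = [] := by
        rw [List.filter_eq_nil_iff]
        intro q hq
        have := hSlt q hq
        simp; omega
      rw [h2, List.append_nil]
      congr 1
      funext a
      simp
    unfold deduccion deduccion_alt
    rw [if_neg hl]
    simp only [foldl_altStep, hs, PySem.List.pyGetD_zero_cons, hf0m, hfilter, refOf, hF']
    by_cases hbig : (List.map (fun p => p.1) (f0 :: F')).length ≥ 2
    · simp only [if_pos hbig]
    · simp only [if_neg hbig]
      have hF0 : F' = [] := by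
        rcases F' with _ | ⟨a, t⟩
        · rfl
        · exact absurd (by simp) hbig
      subst hF0
      by_cases hlow : lowOf (x :: rest) = []
      · have hsec : secOf (x :: rest) = none := by simp [secOf, hlow]
        have hS0 : PySem.List.sorted (lowOf (x :: rest)) (fun p => p.2) true = [] :=
          (PySem.List.sorted_eq_nil_iff _ _ _).mpr hlow
        rw [hsec, hS0]
        simp [PySem.List.len]
      · have hsec : secOf (x :: rest) = some (maxV (lowOf (x :: rest)), fkey (lowOf (x :: rest))) := by
          simp [secOf, hlow]
        have hle2 : ∀ q ∈ lowOf (x :: rest), q.2 ≤ maxV (lowOf (x :: rest)) :=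
          fun q hq => maxV_le _ q hq
        have hs2 : PySem.List.sorted (lowOf (x :: rest)) (fun p => p.2) true =
            (lowOf (x :: rest)).filter (fun p => p.2 == maxV (lowOf (x :: rest))) ++
              PySem.List.sorted ((lowOf (x :: rest)).filter
                (fun p => decide (p.2 < maxV (lowOf (x :: rest))))) (fun p => p.2) true :=
          sortedSplit _ _ hle2
        obtain ⟨g0, G', hG'⟩ : ∃ g0 G',
            (lowOf (x :: rest)).filter (fun p => p.2 == maxV (lowOf (x :: rest))) = g0 :: G' := by
          rcases hq : (lowOf (x :: rest)).filter (fun p => p.2 == maxV (lowOf (x :: rest))) with _ | ⟨g0, G'⟩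
          · exact absurd hq (filter_maxV_ne_nil _ hlow)
          · exact ⟨g0, G', hq⟩
        have hfk : fkey (lowOf (x :: rest)) = g0.1 := by
          rw [fkey, hG']; rfl
        rw [hsec, hs2, hG', hfk, List.cons_append]
        rw [if_pos (by simp [PySem.List.len]; omega)]
        simp [PySem.List.pyGetD, PySem.List.pyGet?, PySem.List.pyIdx?]
        rw [if_pos (by omega)]
        simp

-- ===== VERDICT (by name: the statement is the Claim_ definition above) =====
theorem deduccion_spec : Claim_equal_deduccion := by
  unfold Claim_equal_deduccion Spec_deduccion
  intro dic _
  exact deduccion_eq_alt dic
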